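-- pv_equiv track=rewrite | github.com/Rschiattarella/DNN_for_Mapping | Customize_OneHot.py | customize_OH
-- ===== SOURCE A (Python) =====
-- def customize_OH(vec):
--     '''Funzione che ritorna un customize one-hot codificando i Nan come 0'''
--     length = len(vec)
--     label = []
--     for n in vec:
--         l = []
--         if n == None:
--             for zero in range(length):
--                 l.append(0)
--         else:
--             l = num_to_vec(n, length)
--         label = label + l
--
--     return label
--
-- def num_to_vec(n,len_vec):
--     '''Funzione che ritorna un vettore di lunghezza len_vec di tutti 0 e un 1 in posizione n'''
--     l=[]
--     for i in range(len_vec):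
--         if i != n:
--             l.append(0)
--         else:
--             l.append(1)
--     return l
-- ===== SOURCE B (Python) =====
-- def customize_OH(vec):
--     '''Flattened one-hot encoding of vec; None blocks stay all zeros.'''
--     length = len(vec)
--     result = [0] * (length * length)
--     for idx, n in enumerate(vec):
--         if n is None:
--             continue
--         if n in range(length):
--             result[idx * length + int(n)] = 1
--     return result
-- ===== Notes on version B (the rewrite author's own statement) =====
-- stated objective: simpler
-- what changed: Replaces per-element row construction (inner loops building rows that are repeatedly concatenated with label = label + l) by one preallocated flat zero array written in place via index arithmetic idx*length+n.
import Mathlib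
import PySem

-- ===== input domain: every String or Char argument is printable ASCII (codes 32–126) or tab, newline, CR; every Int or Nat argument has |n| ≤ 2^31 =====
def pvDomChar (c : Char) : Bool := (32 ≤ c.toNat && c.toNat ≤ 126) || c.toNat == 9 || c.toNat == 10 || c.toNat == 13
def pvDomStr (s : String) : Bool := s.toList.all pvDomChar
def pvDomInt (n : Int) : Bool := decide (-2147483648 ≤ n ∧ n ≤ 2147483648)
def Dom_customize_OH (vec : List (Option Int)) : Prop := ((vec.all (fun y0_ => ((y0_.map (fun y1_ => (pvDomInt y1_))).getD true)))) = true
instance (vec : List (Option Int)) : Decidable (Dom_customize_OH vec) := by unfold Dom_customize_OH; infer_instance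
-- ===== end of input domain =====

-- B replaces A's row-building inner loops and repeated list concatenation by one
-- preallocated flat zero list written in place via index arithmetic (objective: simpler).

-- ===== PORT A =====
-- num_to_vec(n, len_vec): zeros of length len_vec with a 1 at position n (if hit)
def num_to_vec (n : Int) (len_vec : Nat) : List Int :=
  (List.range len_vec).foldl (fun (l : List Int) (i : Nat) => if (i : Int) ≠ n then l ++ [0] else l ++ [1]) []

-- loop body of A's `for n in vec` (helper name for the inline body)
def ohStep (length : Nat) (label : List Int) (n : Option Int) : List Int :=
  match n with
  | none => label ++ (List.range length).foldl (fun (l : List Int) _ => l ++ [0]) []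
  | some m => label ++ num_to_vec m length

def customize_OH (vec : List (Option Int)) : List Int :=
  let length := vec.length
  vec.foldl (ohStep length) []

-- ===== PORT B =====
-- loop body of B's `for idx, n in enumerate(vec)` (helper name for the inline body)
def ohAltStep (length : Nat) (result : List Int) (p : Int × Option Int) : List Int :=
  match p.2 with
  | none => result
  | some n =>
      if 0 ≤ n ∧ n < (length : Int) then result.set (p.1 * (length : Int) + n).toNat 1
      else result

def customize_OH_alt (vec : List (Option Int)) : List Int :=
  let length := vec.length
  (PySem.List.enumerate vec).foldl (ohAltStep length) (List.replicate (length * length) 0)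

-- ===== PRECONDITION & SPEC =====
def Spec_customize_OH (vec : List (Option Int)) (out : List Int) : Prop := out = customize_OH_alt vec
instance (vec : List (Option Int)) (out : List Int) : Decidable (Spec_customize_OH vec out) := by unfold Spec_customize_OH; infer_instance

-- ===== CLAIM (what is proved, stated in full; the proofs are below) =====
def Claim_equal_customize_OH : Prop := ∀ (vec : List (Option Int)), Dom_customize_OH vec → Spec_customize_OH vec (customize_OH vec)

-- ===== LEMMAS AND PROOFS =====

-- the "row" both programs contribute for one element
def pvRow (L : Nat) (o : Option Int) : List Int :=
  (List.range L).map (fun (i : Nat) =>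
    match o with
    | none => 0
    | some m => if (i : Int) = m then 1 else 0)

theorem pvRow_none (L : Nat) : List.replicate L (0 : Int) = pvRow L none := by
  simp [pvRow, List.map_const']

theorem num_to_vec_eq (n : Int) (L : Nat) : num_to_vec n L = pvRow L (some n) := by
  unfold num_to_vec pvRow
  have h : ∀ (l : List Int),
      (List.range L).foldl (fun (l : List Int) (i : Nat) => if (i : Int) ≠ n then l ++ [0] else l ++ [1]) l
        = l ++ (List.range L).map (fun (i : Nat) => if (i : Int) = n then (1 : Int) else 0) := by
    induction L with
    | zero => intro l; simp
    | succ k ih =>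
      intro l
      rw [List.range_succ, List.foldl_append, List.map_append, ih]
      by_cases h : (k : Int) = n <;> simp [h]
  simpa using h []

theorem zeros_fold_eq (L : Nat) : (List.range L).foldl (fun (l : List Int) _ => l ++ [0]) []
    = pvRow L none := by
  rw [← pvRow_none]
  have h : ∀ (l : List Int),
      (List.range L).foldl (fun (l : List Int) _ => l ++ [0]) l
        = l ++ List.replicate L 0 := by
    induction L with
    | zero => intro l; simp
    | succ k ih =>
      intro l
      rw [List.range_succ, List.foldl_append, ih]
      simp [List.replicate_succ']
  simpa using h []

theorem ohStep_eq (L : Nat) (label : List Int) (n : Option Int) :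
    ohStep L label n = label ++ pvRow L n := by
  cases n with
  | none => simp only [ohStep, zeros_fold_eq]
  | some m => simp only [ohStep, num_to_vec_eq]

theorem A_eq_flatMap (vec : List (Option Int)) :
    customize_OH vec = vec.flatMap (pvRow vec.length) := by
  have h : ohStep vec.length = fun label n => label ++ pvRow vec.length n := by
    funext label n; exact ohStep_eq _ _ _
  show List.foldl (ohStep vec.length) [] vec = vec.flatMap (pvRow vec.length)
  rw [h, PySem.List.foldl_append_eq_flatMap, List.nil_append]

-- in-range one-hot row as an in-place set on a zero row
theorem row_set (L : Nat) (n : Int) (h0 : 0 ≤ n) (hL : n < (L : Int)) :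
    (List.replicate L (0 : Int)).set n.toNat 1 = pvRow L (some n) := by
  apply List.ext_getElem
  · simp [pvRow]
  · intro i hi _
    have hiL : i < L := by simpa using hi
    have hn : n.toNat < L := by omega
    rw [List.getElem_set]
    simp only [pvRow, List.getElem_map, List.getElem_range]
    by_cases h : n.toNat = i
    · have : (i : Int) = n := by omega
      simp [h, this]
    · have : ¬ ((i : Int) = n) := by omega
      simp [h, this, List.getElem_replicate]

-- an element missing its row (out of range) contributes an all-zero row
theorem row_out (L : Nat) (n : Int) (h : ¬ (0 ≤ n ∧ n < (L : Int))) :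
    pvRow L (some n) = pvRow L none := by
  unfold pvRow
  apply List.map_congr_left
  intro i hi
  have hiL : i < L := List.mem_range.mp hi
  have : ¬ ((i : Int) = n) := by omega
  simp [this]

-- main invariant of B's single pass
theorem B_inv (L : Nat) (xs : List (Option Int)) (k : Int) (pre : List Int)
    (hk : 0 ≤ k) (hpre : pre.length = k.toNat * L) :
    (PySem.List.enumerate xs k).foldl (ohAltStep L) (pre ++ List.replicate (xs.length * L) 0)
    = pre ++ xs.flatMap (pvRow L) := by
  induction xs generalizing k pre with
  | nil => simp [PySem.List.enumerate]
  | cons o xs ih =>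
    have hsplit : List.replicate ((o :: xs).length * L) (0 : Int)
        = List.replicate L 0 ++ List.replicate (xs.length * L) 0 := by
      rw [show (o :: xs).length * L = L + xs.length * L from by
        rw [List.length_cons, Nat.succ_mul]; exact Nat.add_comm _ _]
      rw [List.replicate_append_replicate]
    have hk1 : (k + 1).toNat = k.toNat + 1 := by omega
    rw [PySem.List.enumerate_cons, List.foldl_cons, hsplit]
    cases o with
    | none =>
      have step : ohAltStep L (pre ++ (List.replicate L 0 ++ List.replicate (xs.length * L) 0)) (k, none)
          = (pre ++ List.replicate L 0) ++ List.replicate (xs.length * L) 0 := by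
        simp [ohAltStep, List.append_assoc]
      rw [step, ih (k + 1) (pre ++ List.replicate L 0) (by omega)
        (by simp only [List.length_append, List.length_replicate, hpre, hk1, Nat.succ_mul])]
      simp [List.flatMap_cons, pvRow_none, List.append_assoc]
    | some n =>
      by_cases hin : 0 ≤ n ∧ n < (L : Int)
      · have hkL : k * (L : Int) = ((k.toNat * L : Nat) : Int) := by
          push_cast
          rw [Int.toNat_of_nonneg hk]
        have hidx : (k * (L : Int) + n).toNat = pre.length + n.toNat := by
          rw [hkL, hpre]
          omega
        have step : ohAltStep L (pre ++ (List.replicate L 0 ++ List.replicate (xs.length * L) 0)) (k, some n)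
            = (pre ++ (List.replicate L 0).set n.toNat 1) ++ List.replicate (xs.length * L) 0 := by
          simp only [ohAltStep, hin, and_self, if_pos]
          rw [← List.append_assoc,
            List.set_append_left _ _ (by simp only [List.length_append, List.length_replicate]; omega),
            List.set_append_right _ _ (by omega),
            show (k * (L : Int) + n).toNat - pre.length = n.toNat from by omega]
        rw [step, ih (k + 1) (pre ++ (List.replicate L 0).set n.toNat 1) (by omega)
          (by simp only [List.length_append, List.length_set, List.length_replicate, hpre, hk1, Nat.succ_mul])]
        simp [List.flatMap_cons, row_set L n hin.1 hin.2, List.append_assoc]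
      · have step : ohAltStep L (pre ++ (List.replicate L 0 ++ List.replicate (xs.length * L) 0)) (k, some n)
            = (pre ++ List.replicate L 0) ++ List.replicate (xs.length * L) 0 := by
          simp only [ohAltStep, hin, if_neg, not_false_iff]
          simp [List.append_assoc]
        rw [step, ih (k + 1) (pre ++ List.replicate L 0) (by omega)
          (by simp only [List.length_append, List.length_replicate, hpre, hk1, Nat.succ_mul])]
        simp [List.flatMap_cons, row_out L n hin, pvRow_none, List.append_assoc]

theorem B_eq_flatMap (vec : List (Option Int)) :
    customize_OH_alt vec = vec.flatMap (pvRow vec.length) := by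
  unfold customize_OH_alt
  simpa using B_inv vec.length vec 0 [] le_rfl (by simp)

-- ===== VERDICT (by name: the statement is the Claim_ definition above) =====
theorem customize_OH_spec : Claim_equal_customize_OH := by
  intro vec _
  unfold Spec_customize_OH
  rw [A_eq_flatMap, B_eq_flatMap]
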